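-- pv_equiv track=rewrite | github.com/Semantic-Infrastructure-Lab/reveal | reveal/cli/handlers/batch.py | _group_results_by_scheme
-- ===== SOURCE A (Python) =====
-- from typing import TYPE_CHECKING, Optional, Dict, List, Any
--
-- def _group_results_by_scheme(results: list) -> dict:
--     """Group results by adapter scheme.
--
--     Args:
--         results: List of individual results
--
--     Returns:
--         Dict mapping scheme to list of results
--     """
--     by_scheme: Dict[str, List[Any]] = {}
--     for result in results:
--         scheme = result.get('scheme', 'unknown')
--         if scheme not in by_scheme:
--             by_scheme[scheme] = []
--         by_scheme[scheme].append(result)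
--     return by_scheme
-- ===== SOURCE B (Python) =====
-- def _group_results_by_scheme(results: list) -> dict:
--     """Group results by adapter scheme (two-pass: dedup keys, then one filter per key)."""
--     key = lambda r: r.get('scheme', 'unknown')
--     schemes = dict.fromkeys(key(r) for r in results)
--     return {s: [r for r in results if key(r) == s] for s in schemes}
-- ===== Notes on version B (the rewrite author's own statement) =====
-- stated objective: alternative
-- what changed: Replaces A's single-pass incremental dict of growing lists with a two-phase plan: first collect the distinct schemes in first-occurrence order (dict.fromkeys), then build each group with one filter pass over the input per scheme.
import Mathlib
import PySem

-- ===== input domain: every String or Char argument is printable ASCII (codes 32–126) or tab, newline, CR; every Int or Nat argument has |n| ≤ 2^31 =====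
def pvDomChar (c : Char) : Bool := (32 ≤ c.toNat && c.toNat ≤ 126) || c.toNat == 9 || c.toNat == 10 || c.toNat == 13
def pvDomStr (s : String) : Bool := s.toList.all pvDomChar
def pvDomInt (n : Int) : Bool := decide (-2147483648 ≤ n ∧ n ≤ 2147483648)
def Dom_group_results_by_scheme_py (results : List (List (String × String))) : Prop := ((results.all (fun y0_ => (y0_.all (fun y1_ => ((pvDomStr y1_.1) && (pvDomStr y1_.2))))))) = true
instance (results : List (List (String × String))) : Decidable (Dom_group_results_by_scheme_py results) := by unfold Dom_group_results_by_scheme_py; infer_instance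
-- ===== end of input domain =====

-- B groups by first collecting the distinct schemes (ordered dedup) and then filtering the
-- input once per scheme, instead of A's incremental dict of growing lists; objective: alternative.


-- ===== PORT A =====
-- result.get('scheme', 'unknown') on the association-list representation of a Python dict
def pvSchemeKey (r : List (String × String)) : String :=
  PySem.Dict.getD (PySem.Dict.mk r) "scheme" "unknown"

def group_results_by_scheme_py (results : List (List (String × String))) : List (String × List (List (String × String))) :=
  (results.foldl (fun d r =>
      let scheme := pvSchemeKey r
      let d := if d.contains scheme then d else d.insert scheme []
      d.modify scheme [] (fun l => l ++ [r]))
    PySem.Dict.empty).items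

-- ===== PORT B =====
def group_results_by_scheme_py_alt (results : List (List (String × String))) : List (String × List (List (String × String))) :=
  let schemes := PySem.List.dedup (results.map pvSchemeKey)
  schemes.map (fun s => (s, results.filter (fun r => pvSchemeKey r == s)))

-- ===== PRECONDITION & SPEC =====
def Spec_group_results_by_scheme_py (results : List (List (String × String))) (out : List (String × List (List (String × String)))) : Prop := out = group_results_by_scheme_py_alt results
instance (results : List (List (String × String))) (out : List (String × List (List (String × String)))) : Decidable (Spec_group_results_by_scheme_py results out) := by unfold Spec_group_results_by_scheme_py; infer_instance

-- ===== CLAIM (what is proved, stated in full; the proofs are below) =====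
def Claim_equal_group_results_by_scheme_py : Prop := ∀ (results : List (List (String × String))), Dom_group_results_by_scheme_py results → Spec_group_results_by_scheme_py results (group_results_by_scheme_py results)

-- ===== LEMMAS AND PROOFS =====

-- A's insert-empty-then-append step is exactly one 'modify with default []'.
theorem pvStep_eq_modify (d : PySem.Dict String (List (List (String × String)))) (r : List (String × String)) :
    (let scheme := pvSchemeKey r
     let d := if d.contains scheme then d else d.insert scheme []
     d.modify scheme [] (fun l => l ++ [r]))
    = d.modify (pvSchemeKey r) [] (fun l => l ++ [r]) := by
  by_cases h : d.contains (pvSchemeKey r) = true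
  · simp [h]
  · simp only [Bool.not_eq_true] at h
    simp only [h, Bool.false_eq_true, if_false]
    simp only [PySem.Dict.modify, PySem.Dict.getD_insert_self, List.nil_append,
      PySem.Dict.insert_insert_self, PySem.Dict.getD_of_not_contains (h := h)]

-- Items of the modify-append fold: distinct keys in first-occurrence order, each with its filtered group.
theorem pvFold_items (l : List (List (String × String))) (key : List (String × String) → String) :
    ((l.map (fun r => (key r, r))).foldl (fun d p => d.modify p.1 [] (fun w => w ++ [p.2])) PySem.Dict.empty).items
    = (PySem.List.dedup (l.map key)).map (fun s => (s, l.filter (fun r => key r == s))) := by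
  set L := (l.map (fun r => (key r, r))).foldl (fun d p => d.modify p.1 [] (fun w => w ++ [p.2])) PySem.Dict.empty with hL
  have hnd : L.keys.Nodup := by
    rw [hL]
    exact PySem.Dict.nodup_keys_foldl_modify_key _ _ _ _ _ PySem.Dict.nodup_keys_empty
  have hkeys : L.keys = PySem.List.dedup (l.map key) := by
    rw [hL, PySem.Dict.keys_foldl_modify_key]
    simp [PySem.Set.update, PySem.List.dedup_eq_ofList, PySem.Set.ofList_eq_foldl, List.map_map,
      Function.comp_def]
  have hget : ∀ s, L.getD s [] = l.filter (fun r => key r == s) := by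
    intro s
    rw [hL, PySem.Dict.getD_foldl_modify_append]
    simp [PySem.Dict.getD_empty, List.filter_map, Function.comp_def]
  rw [PySem.Dict.items_eq_map_keys L hnd [], hkeys]
  exact List.map_congr_left (fun s _ => by rw [hget s])

-- ===== VERDICT (by name: the statement is the Claim_ definition above) =====
theorem group_results_by_scheme_py_spec : Claim_equal_group_results_by_scheme_py := by
  intro results _
  unfold Spec_group_results_by_scheme_py group_results_by_scheme_py group_results_by_scheme_py_alt
  have hstep : results.foldl (fun d r =>
      let scheme := pvSchemeKey r
      let d := if d.contains scheme then d else d.insert scheme []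
      d.modify scheme [] (fun l => l ++ [r])) PySem.Dict.empty
      = (results.map (fun r => (pvSchemeKey r, r))).foldl
          (fun d p => d.modify p.1 [] (fun w => w ++ [p.2])) PySem.Dict.empty := by
    rw [List.foldl_map]
    congr 1
    funext d r
    exact pvStep_eq_modify d r
  rw [hstep, pvFold_items results pvSchemeKey]
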